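-- pv_equiv track=rewrite | github.com/snehadpatel/CompilerDesign | CD_Project/intermediate.py | generate_intermediate
-- ===== SOURCE A (Python) =====
-- def generate_intermediate(lines):
--
--     ir = []
--
--     for line in lines:
--
--         if "for" in line:
--             ir.append("FOR_LOOP")
--         elif "while" in line:
--             ir.append("WHILE_LOOP")
--         elif "if" in line:
--             ir.append("IF")
--         elif "printf" in line:
--             ir.append("PRINT")
--         else:
--             ir.append("STATEMENT")
--
--     return ir
-- ===== SOURCE B (Python) =====
-- def generate_intermediate(lines):
--     # Staged passes: one boolean pass per keyword, then a zip that combines them.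
--     has_for = ["for" in line for line in lines]
--     has_while = ["while" in line for line in lines]
--     has_if = ["if" in line for line in lines]
--     has_printf = ["printf" in line for line in lines]
--     ir = []
--     for f, w, i, p in zip(has_for, has_while, has_if, has_printf):
--         ir.append("FOR_LOOP" if f else ("WHILE_LOOP" if w else ("IF" if i else ("PRINT" if p else "STATEMENT"))))
--     return ir
-- ===== Notes on version B (the rewrite author's own statement) =====
-- stated objective: alternative
-- what changed: Replaces the single-pass elif-chain accumulator with staged passes: one boolean membership pass per keyword over the whole input, then a zip over the four boolean lists that combines them into tokens.
import Mathlib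
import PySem

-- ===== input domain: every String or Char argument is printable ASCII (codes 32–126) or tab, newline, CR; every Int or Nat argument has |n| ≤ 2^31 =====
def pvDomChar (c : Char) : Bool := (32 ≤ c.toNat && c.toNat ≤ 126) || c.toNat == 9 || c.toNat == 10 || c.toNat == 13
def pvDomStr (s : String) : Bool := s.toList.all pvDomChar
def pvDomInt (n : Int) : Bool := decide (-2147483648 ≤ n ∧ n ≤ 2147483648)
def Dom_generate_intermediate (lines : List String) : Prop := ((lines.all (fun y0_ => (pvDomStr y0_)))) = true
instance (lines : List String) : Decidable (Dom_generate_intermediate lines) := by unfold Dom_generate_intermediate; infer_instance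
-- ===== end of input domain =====

-- B replaces A's single elif-chain accumulator loop with staged passes: one boolean membership pass per keyword, then a zip combining the four boolean lists (alternative decomposition; same cost).


-- ===== PORT A =====
-- A: elif chain appended into an accumulator list, ported as a foldl.
def generate_intermediate (lines : List String) : List String :=
  lines.foldl (fun ir line =>
    if PySem.Str.isIn "for" line then ir ++ ["FOR_LOOP"]
    else if PySem.Str.isIn "while" line then ir ++ ["WHILE_LOOP"]
    else if PySem.Str.isIn "if" line then ir ++ ["IF"]
    else if PySem.Str.isIn "printf" line then ir ++ ["PRINT"]
    else ir ++ ["STATEMENT"]) []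

-- ===== PORT B =====
-- B stage 2: the zip loop over the four boolean lists (stops at the shortest, like Python's zip).
def pvCombine : List Bool → List Bool → List Bool → List Bool → List String
  | f :: fs, w :: ws, i :: is, p :: ps =>
    (if f then "FOR_LOOP" else if w then "WHILE_LOOP" else if i then "IF"
     else if p then "PRINT" else "STATEMENT") :: pvCombine fs ws is ps
  | _, _, _, _ => []

def generate_intermediate_alt (lines : List String) : List String :=
  let hasFor := lines.map (fun line => PySem.Str.isIn "for" line)
  let hasWhile := lines.map (fun line => PySem.Str.isIn "while" line)
  let hasIf := lines.map (fun line => PySem.Str.isIn "if" line)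
  let hasPrintf := lines.map (fun line => PySem.Str.isIn "printf" line)
  pvCombine hasFor hasWhile hasIf hasPrintf

-- ===== PRECONDITION & SPEC =====
def Spec_generate_intermediate (lines : List String) (out : List String) : Prop := out = generate_intermediate_alt lines
instance (lines : List String) (out : List String) : Decidable (Spec_generate_intermediate lines out) := by unfold Spec_generate_intermediate; infer_instance

-- ===== CLAIM =====
def Claim_equal_generate_intermediate : Prop := ∀ (lines : List String), Dom_generate_intermediate lines → Spec_generate_intermediate lines (generate_intermediate lines)

-- ===== LEMMAS AND PROOFS =====
-- zipping four maps over the same list is a map of the combined function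
theorem pvCombine_maps (lines : List String) :
    pvCombine (lines.map (fun line => PySem.Str.isIn "for" line))
      (lines.map (fun line => PySem.Str.isIn "while" line))
      (lines.map (fun line => PySem.Str.isIn "if" line))
      (lines.map (fun line => PySem.Str.isIn "printf" line))
    = lines.map (fun line =>
        if PySem.Str.isIn "for" line then "FOR_LOOP"
        else if PySem.Str.isIn "while" line then "WHILE_LOOP"
        else if PySem.Str.isIn "if" line then "IF"
        else if PySem.Str.isIn "printf" line then "PRINT" else "STATEMENT") := by
  induction lines with
  | nil => rfl
  | cons l t ih => simp only [List.map_cons, pvCombine, ih]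

-- A's fold appends one token per line
theorem pvFold_eq (lines : List String) (acc : List String) :
    lines.foldl (fun ir line =>
      if PySem.Str.isIn "for" line then ir ++ ["FOR_LOOP"]
      else if PySem.Str.isIn "while" line then ir ++ ["WHILE_LOOP"]
      else if PySem.Str.isIn "if" line then ir ++ ["IF"]
      else if PySem.Str.isIn "printf" line then ir ++ ["PRINT"]
      else ir ++ ["STATEMENT"]) acc
    = acc ++ lines.map (fun line =>
        if PySem.Str.isIn "for" line then "FOR_LOOP"
        else if PySem.Str.isIn "while" line then "WHILE_LOOP"
        else if PySem.Str.isIn "if" line then "IF"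
        else if PySem.Str.isIn "printf" line then "PRINT" else "STATEMENT") := by
  induction lines generalizing acc with
  | nil => simp
  | cons l t ih =>
    rw [List.foldl_cons, ih]
    simp only [List.map_cons]
    split_ifs <;> simp

-- ===== VERDICT =====
theorem generate_intermediate_spec : Claim_equal_generate_intermediate := by
  intro lines _
  unfold Spec_generate_intermediate generate_intermediate generate_intermediate_alt
  rw [pvFold_eq, pvCombine_maps]
  simp
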